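-- pv_equiv track=rewrite | github.com/rileysobieski-debug/company-os-v2 | webapp/app.py | _parse_declared_secondary_from_reply
-- ===== SOURCE A (Python) =====
-- def _parse_declared_secondary_from_reply(reply: str) -> str:
--     """Best-effort extraction of the declared-secondary field name from
--     an arrival-note reply. Returns '' if nothing plausible was found."""
--     for line in (reply or "").splitlines():
--         stripped = line.strip()
--         if stripped.lower().startswith(("**my secondary", "## my secondary", "2.")) and stripped.count("**") >= 2:
--             return stripped.split("**")[1].strip().rstrip(":")
--     for line in (reply or "").splitlines():
--         if line.count("**") >= 2:
--             candidate = line.split("**")[1].strip()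
--             if candidate and len(candidate) < 120:
--                 return candidate
--     return ""
-- ===== SOURCE B (Python) =====
-- def _parse_declared_secondary_from_reply(reply: str) -> str:
--     """Single pass: return immediately on a priority line, remember the
--     first fallback candidate, decide at the end."""
--     fallback = None
--     for line in (reply or "").splitlines():
--         stripped = line.strip()
--         if stripped.lower().startswith(("**my secondary", "## my secondary", "2.")) and stripped.count("**") >= 2:
--             return stripped.split("**")[1].strip().rstrip(":")
--         if fallback is None and line.count("**") >= 2:
--             candidate = line.split("**")[1].strip()
--             if candidate and len(candidate) < 120:
--                 fallback = candidate
--     return fallback if fallback is not None else ""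
-- ===== Notes on version B (the rewrite author's own statement) =====
-- stated objective: alternative
-- what changed: A makes two separate passes over the lines (priority scan, then fallback scan); B makes a single pass that returns immediately on a priority line and records the first fallback candidate in an accumulator, deciding at the end.
import Mathlib
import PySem

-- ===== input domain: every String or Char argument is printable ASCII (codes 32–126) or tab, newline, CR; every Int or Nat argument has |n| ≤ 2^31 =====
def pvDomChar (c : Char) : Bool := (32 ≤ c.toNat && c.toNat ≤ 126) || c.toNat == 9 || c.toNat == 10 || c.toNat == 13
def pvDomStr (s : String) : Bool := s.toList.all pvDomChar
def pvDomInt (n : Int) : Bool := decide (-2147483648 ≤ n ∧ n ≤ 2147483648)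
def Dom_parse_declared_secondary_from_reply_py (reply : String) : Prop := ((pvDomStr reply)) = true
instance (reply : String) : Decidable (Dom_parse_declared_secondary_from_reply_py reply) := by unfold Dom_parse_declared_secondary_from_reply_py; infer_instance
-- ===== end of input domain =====

-- B replaces A's two passes over the lines by a single pass that returns on a priority
-- line at once and remembers the first fallback candidate (objective: alternative).

-- exact hand port of str.rstrip(":"): drop the trailing ':' characters
def pvRstripColon (s : String) : String :=
  String.ofList ((s.toList.reverse.dropWhile (fun c => c == ':')).reverse)

-- stripped.lower().startswith(("**my secondary", "## my secondary", "2.")) and stripped.count("**") >= 2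
def pvPrio (stripped : String) : Bool :=
  (PySem.Str.startswith (PySem.Str.lower stripped) "**my secondary" ||
   PySem.Str.startswith (PySem.Str.lower stripped) "## my secondary" ||
   PySem.Str.startswith (PySem.Str.lower stripped) "2.") &&
  decide (2 ≤ PySem.Str.count stripped "**")

-- s.split("**")[1]; every use is guarded by count(s,"**") >= 2, so index 1 exists
def pvPart1 (s : String) : String :=
  (PySem.List.pyGet? ((PySem.Str.split? s "**").getD []) 1).getD ""

-- ===== PORT A =====
-- body of A's first for-loop (returns some v on the Python 'return')
def pvLoop1 (line : String) : Option String :=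
  let stripped := PySem.Str.strip line
  if pvPrio stripped then
    some (pvRstripColon (PySem.Str.strip (pvPart1 stripped)))
  else none

-- body of A's second for-loop
def pvLoop2 (line : String) : Option String :=
  if 2 ≤ PySem.Str.count line "**" then
    let candidate := PySem.Str.strip (pvPart1 line)
    if candidate ≠ "" ∧ PySem.Str.len candidate < 120 then some candidate else none
  else none

def parse_declared_secondary_from_reply_py (reply : String) : String :=
  let lines := PySem.Str.splitlines reply
  match lines.findSome? pvLoop1 with
  | some v => v
  | none =>
    match lines.findSome? pvLoop2 with
    | some v => v
    | none => ""

-- ===== PORT B =====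
-- single pass: return at once on a priority line, remember the first fallback candidate
def pvScanB : List String → Option String → String
  | [], fb => fb.getD ""
  | line :: rest, fb =>
    let stripped := PySem.Str.strip line
    if pvPrio stripped then
      pvRstripColon (PySem.Str.strip (pvPart1 stripped))
    else
      pvScanB rest
        (if fb = none ∧ 2 ≤ PySem.Str.count line "**" then
           let candidate := PySem.Str.strip (pvPart1 line)
           if candidate ≠ "" ∧ PySem.Str.len candidate < 120 then some candidate else fb
         else fb)

def parse_declared_secondary_from_reply_py_alt (reply : String) : String :=
  pvScanB (PySem.Str.splitlines reply) none

-- ===== PRECONDITION & SPEC =====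
def Spec_parse_declared_secondary_from_reply_py (reply : String) (out : String) : Prop := out = parse_declared_secondary_from_reply_py_alt reply
instance (reply : String) (out : String) : Decidable (Spec_parse_declared_secondary_from_reply_py reply out) := by unfold Spec_parse_declared_secondary_from_reply_py; infer_instance

-- ===== CLAIM (what is proved, stated in full; the proofs are below) =====
def Claim_equal_parse_declared_secondary_from_reply_py : Prop := ∀ (reply : String), Dom_parse_declared_secondary_from_reply_py reply → Spec_parse_declared_secondary_from_reply_py reply (parse_declared_secondary_from_reply_py reply)

-- ===== LEMMAS AND PROOFS =====
-- loop invariant of B's single pass: priority match first, then the recorded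
-- fallback, then the first fallback candidate of the remaining lines
set_option maxHeartbeats 1000000 in
theorem pvScanB_eq (lines : List String) (fb : Option String) :
    pvScanB lines fb =
      (((lines.findSome? pvLoop1).orElse (fun _ => fb)).orElse
        (fun _ => lines.findSome? pvLoop2)).getD "" := by
  induction lines generalizing fb with
  | nil => cases fb <;> simp [pvScanB, Option.orElse]
  | cons l ls ih =>
    by_cases hp : pvPrio (PySem.Str.strip l) = true
    · simp [pvScanB, List.findSome?_cons, pvLoop1, hp, Option.orElse]
    · rw [Bool.not_eq_true] at hp
      have hl1 : pvLoop1 l = none := by unfold pvLoop1; simp [hp]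
      have hf1 : (l :: ls).findSome? pvLoop1 = ls.findSome? pvLoop1 := by
        rw [List.findSome?_cons, hl1]
      by_cases hc : 2 ≤ PySem.Str.count l "**"
      · by_cases hcand : PySem.Str.strip (pvPart1 l) ≠ "" ∧ PySem.Str.len (PySem.Str.strip (pvPart1 l)) < 120
        · have hl2 : pvLoop2 l = some (PySem.Str.strip (pvPart1 l)) := by
            unfold pvLoop2
            rw [if_pos hc]
            show (if PySem.Str.strip (pvPart1 l) ≠ "" ∧ PySem.Str.len (PySem.Str.strip (pvPart1 l)) < 120
                 then some (PySem.Str.strip (pvPart1 l)) else none) = some (PySem.Str.strip (pvPart1 l))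
            rw [if_pos hcand]
          have hf2 : (l :: ls).findSome? pvLoop2 = some (PySem.Str.strip (pvPart1 l)) := by
            rw [List.findSome?_cons, hl2]
          have hst : ∀ fb' : Option String,
              (if fb' = none ∧ 2 ≤ PySem.Str.count l "**" then
                 (if PySem.Str.strip (pvPart1 l) ≠ "" ∧ PySem.Str.len (PySem.Str.strip (pvPart1 l)) < 120
                  then some (PySem.Str.strip (pvPart1 l)) else fb') else fb') =
              (if fb' = none then some (PySem.Str.strip (pvPart1 l)) else fb') := by
            intro fb'
            cases fb' with
            | none => rw [if_pos ⟨rfl, hc⟩, if_pos hcand, if_pos rfl]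
            | some a => rw [if_neg (by simp), if_neg (by simp)]
          have hscan : ∀ fb' : Option String, pvScanB (l :: ls) fb' =
              pvScanB ls (if fb' = none then some (PySem.Str.strip (pvPart1 l)) else fb') := by
            intro fb'
            show (if pvPrio (PySem.Str.strip l) = true then
                pvRstripColon (PySem.Str.strip (pvPart1 (PySem.Str.strip l)))
              else pvScanB ls
                (if fb' = none ∧ 2 ≤ PySem.Str.count l "**" then
                   (if PySem.Str.strip (pvPart1 l) ≠ "" ∧ PySem.Str.len (PySem.Str.strip (pvPart1 l)) < 120
                    then some (PySem.Str.strip (pvPart1 l)) else fb') else fb')) = _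
            rw [if_neg (by simp [hp]), hst fb']
          cases fb with
          | none =>
            rw [hscan, if_pos rfl, ih, hf1, hf2]
            cases hls : ls.findSome? pvLoop1 <;> simp [Option.orElse]
          | some a =>
            rw [hscan, if_neg (by simp), ih, hf1, hf2]
            cases hls : ls.findSome? pvLoop1 <;> simp [Option.orElse]
        · have hl2 : pvLoop2 l = none := by
            unfold pvLoop2
            rw [if_pos hc]
            show (if PySem.Str.strip (pvPart1 l) ≠ "" ∧ PySem.Str.len (PySem.Str.strip (pvPart1 l)) < 120
                 then some (PySem.Str.strip (pvPart1 l)) else none) = none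
            rw [if_neg hcand]
          have hf2 : (l :: ls).findSome? pvLoop2 = ls.findSome? pvLoop2 := by
            rw [List.findSome?_cons, hl2]
          have hst : ∀ fb' : Option String,
              (if fb' = none ∧ 2 ≤ PySem.Str.count l "**" then
                 (if PySem.Str.strip (pvPart1 l) ≠ "" ∧ PySem.Str.len (PySem.Str.strip (pvPart1 l)) < 120
                  then some (PySem.Str.strip (pvPart1 l)) else fb') else fb') = fb' := by
            intro fb'
            cases fb' with
            | none => rw [if_pos ⟨rfl, hc⟩, if_neg hcand]
            | some a => rw [if_neg (by simp)]
          have hscan : ∀ fb' : Option String, pvScanB (l :: ls) fb' = pvScanB ls fb' := by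
            intro fb'
            show (if pvPrio (PySem.Str.strip l) = true then
                pvRstripColon (PySem.Str.strip (pvPart1 (PySem.Str.strip l)))
              else pvScanB ls
                (if fb' = none ∧ 2 ≤ PySem.Str.count l "**" then
                   (if PySem.Str.strip (pvPart1 l) ≠ "" ∧ PySem.Str.len (PySem.Str.strip (pvPart1 l)) < 120
                    then some (PySem.Str.strip (pvPart1 l)) else fb') else fb')) = _
            rw [if_neg (by simp [hp]), hst fb']
          rw [hscan, ih, hf1, hf2]
      · have hl2 : pvLoop2 l = none := by unfold pvLoop2; rw [if_neg hc]
        have hf2 : (l :: ls).findSome? pvLoop2 = ls.findSome? pvLoop2 := by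
          rw [List.findSome?_cons, hl2]
        have hst : ∀ fb' : Option String,
            (if fb' = none ∧ 2 ≤ PySem.Str.count l "**" then
               (if PySem.Str.strip (pvPart1 l) ≠ "" ∧ PySem.Str.len (PySem.Str.strip (pvPart1 l)) < 120
                then some (PySem.Str.strip (pvPart1 l)) else fb') else fb') = fb' := by
          intro fb'; rw [if_neg (fun h => hc h.2)]
        have hscan : ∀ fb' : Option String, pvScanB (l :: ls) fb' = pvScanB ls fb' := by
          intro fb'
          show (if pvPrio (PySem.Str.strip l) = true then
              pvRstripColon (PySem.Str.strip (pvPart1 (PySem.Str.strip l)))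
            else pvScanB ls
              (if fb' = none ∧ 2 ≤ PySem.Str.count l "**" then
                 (if PySem.Str.strip (pvPart1 l) ≠ "" ∧ PySem.Str.len (PySem.Str.strip (pvPart1 l)) < 120
                  then some (PySem.Str.strip (pvPart1 l)) else fb') else fb')) = _
          rw [if_neg (by simp [hp]), hst fb']
        rw [hscan, ih, hf1, hf2]

-- ===== VERDICT (by name: the statement is the Claim_ definition above) =====
set_option maxHeartbeats 1000000 in
theorem parse_declared_secondary_from_reply_py_spec : Claim_equal_parse_declared_secondary_from_reply_py := by
  intro reply _
  unfold Spec_parse_declared_secondary_from_reply_py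
  unfold parse_declared_secondary_from_reply_py parse_declared_secondary_from_reply_py_alt
  rw [pvScanB_eq]
  cases h1 : (PySem.Str.splitlines reply).findSome? pvLoop1 <;>
    cases h2 : (PySem.Str.splitlines reply).findSome? pvLoop2 <;>
      simp [h1, h2, Option.orElse]
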